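-- pv_equiv track=rewrite | github.com/KhudV/vk_algo_course | Рубежный контроль 2/sem2.py | max_min_multiplication
-- ===== SOURCE A (Python) =====
-- def max_min_multiplication(data):
--     if len(data) < 3:
--         return -1
--     min_index = 1
--     max_index = 2
--     i = 1
--     while 2 * i + 1 < len(data):
--         min_index = 2 * i + 1
--         i = 2 * i + 1
--     i = 0
--     # Первоначально i = 0, правый потомок = 2
--     while 2 * i + 2 < len(data):
--         max_index = 2 * i + 2
--         i = 2 * i + 2
--     return data[min_index] * data[max_index]
-- ===== SOURCE B (Python) =====
-- def max_min_multiplication(data):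
--     if len(data) < 3:
--         return -1
--     n = len(data)
--     # deepest left-chain index = largest 2^k - 1 < n; deepest right-chain index = largest 2^k - 2 < n
--     min_index = (1 << (n.bit_length() - 1)) - 1
--     max_index = (1 << ((n + 1).bit_length() - 1)) - 2
--     return data[min_index] * data[max_index]
-- ===== Notes on version B (the rewrite author's own statement) =====
-- stated objective: simpler
-- what changed: Replaced the two child-jumping while loops by closed-form bit formulas: the deepest left-chain index is (1 << (n.bit_length()-1)) - 1 and the deepest right-chain index is (1 << ((n+1).bit_length()-1)) - 2.
import Mathlib
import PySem

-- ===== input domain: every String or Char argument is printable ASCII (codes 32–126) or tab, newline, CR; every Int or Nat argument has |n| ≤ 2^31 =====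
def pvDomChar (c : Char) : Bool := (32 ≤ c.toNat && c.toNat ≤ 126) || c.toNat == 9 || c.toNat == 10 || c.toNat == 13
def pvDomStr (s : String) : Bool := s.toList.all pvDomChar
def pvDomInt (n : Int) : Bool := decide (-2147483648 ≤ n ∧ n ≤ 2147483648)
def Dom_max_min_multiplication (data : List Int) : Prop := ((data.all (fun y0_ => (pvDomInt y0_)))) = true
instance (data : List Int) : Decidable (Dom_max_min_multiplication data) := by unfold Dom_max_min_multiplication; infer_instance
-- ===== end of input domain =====

-- B replaces A's two child-jumping while loops by closed-form bit formulas for the two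
-- deepest chain indices (simpler; same result, proved equal below).

-- ===== PORT A =====
-- while 2*i+1 < len(data): min_index = 2*i+1; i = 2*i+1
def pvLeftChain (n i mi : Nat) : Nat :=
  if 2 * i + 1 < n then pvLeftChain n (2 * i + 1) (2 * i + 1) else mi
termination_by n - i
decreasing_by omega

-- while 2*i+2 < len(data): max_index = 2*i+2; i = 2*i+2
def pvRightChain (n i ma : Nat) : Nat :=
  if 2 * i + 2 < n then pvRightChain n (2 * i + 2) (2 * i + 2) else ma
termination_by n - i
decreasing_by omega

def max_min_multiplication (data : List Int) : Int :=
  if data.length < 3 then -1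
  else
    let min_index := pvLeftChain data.length 1 1
    let max_index := pvRightChain data.length 0 2
    -- data[min_index] * data[max_index]; both indices are provably < len, so getD 0 is never used
    ((PySem.List.pyGet? data (min_index : Int)).getD 0) *
      ((PySem.List.pyGet? data (max_index : Int)).getD 0)

-- ===== PORT B =====
-- n.bit_length() - 1 for a positive Python int n is Nat.log2 n, so
-- (1 << (n.bit_length() - 1)) - 1 = 2 ^ Nat.log2 n - 1 and
-- (1 << ((n+1).bit_length() - 1)) - 2 = 2 ^ Nat.log2 (n+1) - 2.
def max_min_multiplication_alt (data : List Int) : Int :=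
  if data.length < 3 then -1
  else
    let n := data.length
    let min_index := 2 ^ Nat.log2 n - 1
    let max_index := 2 ^ Nat.log2 (n + 1) - 2
    ((PySem.List.pyGet? data (min_index : Int)).getD 0) *
      ((PySem.List.pyGet? data (max_index : Int)).getD 0)

-- ===== PRECONDITION & SPEC =====
def Spec_max_min_multiplication (data : List Int) (out : Int) : Prop := out = max_min_multiplication_alt data
instance (data : List Int) (out : Int) : Decidable (Spec_max_min_multiplication data out) := by unfold Spec_max_min_multiplication; infer_instance

-- ===== CLAIM (what is proved, stated in full; the proofs are below) =====
def Claim_equal_max_min_multiplication : Prop := ∀ (data : List Int), Dom_max_min_multiplication data → Spec_max_min_multiplication data (max_min_multiplication data)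

-- ===== LEMMAS AND PROOFS =====

theorem pvLeftChain_closed : ∀ (d k n i : Nat), n - i ≤ d → 1 ≤ k → i = 2 ^ k - 1 → i < n →
    pvLeftChain n i i = 2 ^ Nat.log2 n - 1 := by
  intro d
  induction d with
  | zero => intro k n i hd _ _ hin; omega
  | succ d ih =>
    intro k n i hd hk hi hin
    have h1 : 1 ≤ 2 ^ k := Nat.one_le_two_pow
    rw [pvLeftChain]
    split
    · rename_i hlt
      have : 2 * i + 1 = 2 ^ (k + 1) - 1 := by
        rw [pow_succ]; omega
      exact ih (k + 1) n (2 * i + 1) (by omega) (by omega) this hlt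
    · rename_i hge
      have h2 : 2 ^ k ≤ n := by omega
      have h3 : n < 2 ^ (k + 1) := by rw [pow_succ]; omega
      rw [Nat.log2_eq_log_two, Nat.log_eq_of_pow_le_of_lt_pow h2 h3]
      omega

theorem pvRightChain_closed : ∀ (d k n i : Nat), n - i ≤ d → 2 ≤ k → i = 2 ^ k - 2 → i < n →
    pvRightChain n i i = 2 ^ Nat.log2 (n + 1) - 2 := by
  intro d
  induction d with
  | zero => intro k n i hd _ _ hin; omega
  | succ d ih =>
    intro k n i hd hk hi hin
    have h1 : 2 ≤ 2 ^ k := by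
      calc 2 = 2 ^ 1 := by norm_num
      _ ≤ 2 ^ k := Nat.pow_le_pow_right (by norm_num) (by omega)
    rw [pvRightChain]
    split
    · rename_i hlt
      have : 2 * i + 2 = 2 ^ (k + 1) - 2 := by
        rw [pow_succ]; omega
      exact ih (k + 1) n (2 * i + 2) (by omega) (by omega) this hlt
    · rename_i hge
      have h2 : 2 ^ k ≤ n + 1 := by omega
      have h3 : n + 1 < 2 ^ (k + 1) := by rw [pow_succ]; omega
      rw [Nat.log2_eq_log_two, Nat.log_eq_of_pow_le_of_lt_pow h2 h3]
      omega

-- ===== VERDICT (by name: the statement is the Claim_ definition above) =====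
theorem max_min_multiplication_spec : Claim_equal_max_min_multiplication := by
  intro data _
  unfold Spec_max_min_multiplication max_min_multiplication max_min_multiplication_alt
  by_cases h : data.length < 3
  · simp [h]
  · simp only [h, if_false]
    have hmin : pvLeftChain data.length 1 1 = 2 ^ Nat.log2 data.length - 1 :=
      pvLeftChain_closed data.length 1 data.length 1 (by omega) (by norm_num) (by norm_num)
        (by omega)
    have hmax : pvRightChain data.length 0 2 = 2 ^ Nat.log2 (data.length + 1) - 2 := by
      rw [pvRightChain]
      have h2 : 2 * 0 + 2 < data.length := by omega
      simp only [h2, if_true]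
      exact pvRightChain_closed data.length 2 data.length 2 (by omega) (by norm_num)
        (by norm_num) (by omega)
    rw [hmin, hmax]
    have e1 : (1 : ℕ) ≤ 2 ^ Nat.log2 data.length := Nat.one_le_two_pow
    have e2 : (2 : ℕ) ≤ 2 ^ Nat.log2 (data.length + 1) := by
      have h1 : 1 ≤ Nat.log2 (data.length + 1) := (Nat.le_log2 (by omega)).mpr (by omega)
      calc (2 : ℕ) = 2 ^ 1 := by norm_num
      _ ≤ 2 ^ Nat.log2 (data.length + 1) := Nat.pow_le_pow_right (by norm_num) h1
    rw [Nat.cast_sub e1, Nat.cast_sub e2]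
    push_cast
    rfl
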